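-- pv_equiv track=rewrite | github.com/eytanmartiano-creator/reel-time-project | Final_python.py | check_deadline_violations
-- ===== SOURCE A (Python) =====
-- def check_deadline_violations(seq):
--     clock = 0
--     violations = []
--
--     for job in seq:
--         name, exec_time, period, arrival, deadline = job
--         start = max(clock, arrival)
--         finish = start + exec_time
--         if finish > deadline:
--             violations.append((name, finish, deadline, finish - deadline))
--         clock = finish
--
--     return len(violations) == 0, violations
-- ===== SOURCE B (Python) =====
-- def check_deadline_violations(seq):
--     # Max-plus closed form instead of the clock recurrence:
--     # finish_i = E[i+1] + max(0, max_{k<=i}(arrival_k - E[k]))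
--     # where E are the exclusive prefix sums of the exec times.
--     jobs = list(seq)
--     pre = [0]
--     for j in jobs:
--         pre.append(pre[-1] + j[1])
--     finishes = []
--     M = 0
--     for j, p in zip(jobs, pre):
--         M = max(M, j[3] - p)
--         finishes.append(M + p + j[1])
--     violations = [(j[0], f, j[4], f - j[4])
--                   for j, f in zip(jobs, finishes) if f > j[4]]
--     return not violations, violations
-- ===== Notes on version B (the rewrite author's own statement) =====
-- stated objective: alternative
-- what changed: Replaces A's clock = max(clock, arrival) + exec recurrence by the max-plus closed form finish_i = prefix_exec_sum + running max of (arrival_k - prefix_exec_sum_k), computed from prefix sums, with violations filtered in a separate pass.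
import Mathlib
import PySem

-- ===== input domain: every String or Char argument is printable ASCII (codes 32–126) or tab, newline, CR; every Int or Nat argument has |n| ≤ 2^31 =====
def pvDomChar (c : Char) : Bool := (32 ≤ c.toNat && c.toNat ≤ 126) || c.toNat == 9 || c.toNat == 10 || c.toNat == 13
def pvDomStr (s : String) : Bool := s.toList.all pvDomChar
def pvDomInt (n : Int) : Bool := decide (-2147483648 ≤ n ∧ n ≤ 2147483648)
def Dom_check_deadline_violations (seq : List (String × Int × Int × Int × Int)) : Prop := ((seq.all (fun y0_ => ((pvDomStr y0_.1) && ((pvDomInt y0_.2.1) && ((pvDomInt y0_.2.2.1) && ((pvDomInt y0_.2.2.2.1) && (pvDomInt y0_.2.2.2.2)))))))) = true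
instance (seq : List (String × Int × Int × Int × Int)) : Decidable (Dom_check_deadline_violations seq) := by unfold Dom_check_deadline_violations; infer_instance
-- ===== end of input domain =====

-- B replaces A's clock recurrence by the max-plus closed form (prefix exec sums + running max of arrival minus prefix sum), then filters; same cost, alternative algorithm.
-- ===== PORT A =====
-- A's loop body: state is (clock, violations); append when finish > deadline.
def aStep (st : Int × List (String × Int × Int × Int)) (job : String × Int × Int × Int × Int) :
    Int × List (String × Int × Int × Int) :=
  let (name, exec_time, _period, arrival, deadline) := job
  let start := max st.1 arrival
  let finish := start + exec_time
  let violations := if finish > deadline then st.2 ++ [(name, finish, deadline, finish - deadline)] else st.2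
  (finish, violations)

def check_deadline_violations (seq : List (String × Int × Int × Int × Int)) : Bool × (List (String × Int × Int × Int)) :=
  let st := seq.foldl aStep (0, [])
  (st.2.length == 0, st.2)

-- ===== PORT B =====
-- Source B's first loop: exclusive prefix sums of the exec times (pre[-1] + j[1] appends)
def bPrefix (acc : Int) : List (String × Int × Int × Int × Int) → List Int
  | [] => []
  | j :: t => (acc + j.2.1) :: bPrefix (acc + j.2.1) t

-- Source B's second loop: running max M of (arrival - prefix sum); finish = M + p + exec
def bFin (M : Int) : List ((String × Int × Int × Int × Int) × Int) → List Int
  | [] => []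
  | (j, p) :: t =>
    let M' := max M (j.2.2.2.1 - p)
    (M' + p + j.2.1) :: bFin M' t

def check_deadline_violations_alt (seq : List (String × Int × Int × Int × Int)) : Bool × (List (String × Int × Int × Int)) :=
  let pre := 0 :: bPrefix 0 seq
  let finishes := bFin 0 (seq.zip pre)
  let violations := (seq.zip finishes).filterMap (fun jf =>
    let (j, f) := jf
    if f > j.2.2.2.2 then some (j.1, f, j.2.2.2.2, f - j.2.2.2.2) else none)
  (violations.isEmpty, violations)

-- ===== PRECONDITION & SPEC =====
def Spec_check_deadline_violations (seq : List (String × Int × Int × Int × Int)) (out : Bool × (List (String × Int × Int × Int))) : Prop := out = check_deadline_violations_alt seq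
instance (seq : List (String × Int × Int × Int × Int)) (out : Bool × (List (String × Int × Int × Int))) : Decidable (Spec_check_deadline_violations seq out) := by unfold Spec_check_deadline_violations; infer_instance

-- ===== CLAIM =====
def Claim_equal_check_deadline_violations : Prop := ∀ (seq : List (String × Int × Int × Int × Int)), Dom_check_deadline_violations seq → Spec_check_deadline_violations seq (check_deadline_violations seq)

-- ===== LEMMAS AND PROOFS =====
-- proof-only helper: the per-job finish times produced by A's clock recurrence
def aFin (clock : Int) : List (String × Int × Int × Int × Int) → List Int
  | [] => []
  | (_, e, _, a, _) :: t =>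
    let f := max clock a + e
    f :: aFin f t

lemma loop_eq (seq : List (String × Int × Int × Int × Int)) :
    ∀ (clock : Int) (acc : List (String × Int × Int × Int)),
    (seq.foldl aStep (clock, acc)).2 =
      acc ++ (seq.zip (aFin clock seq)).filterMap (fun jf =>
        let (j, f) := jf
        if f > j.2.2.2.2 then some (j.1, f, j.2.2.2.2, f - j.2.2.2.2) else none) := by
  induction seq with
  | nil => simp
  | cons h t ih =>
    intro clock acc
    obtain ⟨name, e, p, a, d⟩ := h
    simp only [List.foldl_cons, aStep, aFin, List.zip_cons_cons, List.filterMap_cons]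
    by_cases hv : max clock a + e > d <;> simp [hv, ih]

-- the max-plus closed form: if clock = p + M then A's finish list equals B's
lemma fin_eq (seq : List (String × Int × Int × Int × Int)) :
    ∀ (clock M p : Int), clock = p + M →
    aFin clock seq = bFin M (seq.zip (p :: bPrefix p seq)) := by
  induction seq with
  | nil => intros; rfl
  | cons h t ih =>
    intro clock M p hcl
    obtain ⟨name, e, per, a, d⟩ := h
    simp only [aFin, bPrefix, List.zip_cons_cons, bFin]
    have h1 : max clock a + e = max M (a - p) + p + e := by omega
    rw [h1, ih (max M (a - p) + p + e) (max M (a - p)) (p + e) (by ring)]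

theorem check_deadline_violations_spec : Claim_equal_check_deadline_violations := by
  intro seq _
  unfold Spec_check_deadline_violations check_deadline_violations check_deadline_violations_alt
  have h := loop_eq seq 0 []
  simp only [List.nil_append] at h
  simp only [h, fin_eq seq 0 0 0 (by ring)]
  cases (seq.zip (bFin 0 (seq.zip (0 :: bPrefix 0 seq)))).filterMap (fun jf =>
        let (j, f) := jf
        if f > j.2.2.2.2 then some (j.1, f, j.2.2.2.2, f - j.2.2.2.2) else none) <;> simp
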